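-- pv_equiv track=rewrite | github.com/MKScroggs/Truth-Table-Generator-Python | ExpressionTree.py | get_paren_map
-- ===== SOURCE A (Python) =====
-- def get_paren_map(list_):
--     """
--     Makes a map of the number of open parentheses at each point in a list
--     arg1: an expression in list format
--     returns: a list of equal length to arg1, with an int count of the number
--         of open parentheses at each point
--     """
--     paren_map = []
--     count = 0
--     for i in list_:
--         if i == '(':
--             count += 1
--             paren_map.append(count)
--         elif i == ')':
--             paren_map.append(count)  # store before incrementing to count the
--             # paren before decrementing
--             count -= 1
--         else:
--             paren_map.append(count)
--
--     return paren_map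
-- ===== SOURCE B (Python) =====
-- def get_paren_map(list_):
--     """
--     Makes a map of the number of open parentheses at each point in a list
--     arg1: an expression in list format
--     returns: a list of equal length to arg1, with an int count of the number
--         of open parentheses at each point
--     """
--     counts = [0]
--     c = 0
--     for t in list_:
--         c += 1 if t == '(' else -1 if t == ')' else 0
--         counts.append(c)
--     return [max(counts[i], counts[i + 1]) for i in range(len(list_))]
-- ===== Notes on version B (the rewrite author's own statement) =====
-- stated objective: alternative
-- what changed: Replaces the fused branch-per-token append loop with a prefix-sum table of boundary depths plus a pairwise max(c_i, c_{i+1}) combine pass.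
import Mathlib
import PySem

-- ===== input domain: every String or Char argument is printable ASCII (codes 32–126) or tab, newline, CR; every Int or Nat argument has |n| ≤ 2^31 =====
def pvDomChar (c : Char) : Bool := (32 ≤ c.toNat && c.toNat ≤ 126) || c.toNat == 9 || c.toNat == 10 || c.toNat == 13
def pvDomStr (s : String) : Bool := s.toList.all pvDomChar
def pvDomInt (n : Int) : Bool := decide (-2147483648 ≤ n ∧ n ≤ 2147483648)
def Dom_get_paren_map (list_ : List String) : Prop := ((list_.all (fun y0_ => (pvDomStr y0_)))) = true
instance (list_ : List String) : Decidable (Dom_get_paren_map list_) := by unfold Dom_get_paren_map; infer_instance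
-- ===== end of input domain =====

-- B replaces A's fused branch-per-token append loop with a prefix-sum table of
-- boundary depths plus a pairwise max(c_i, c_{i+1}) pass (alternative decomposition, same cost).


-- ===== PORT A =====
-- loop state: (paren_map, count)
def get_paren_map (list_ : List String) : List Int :=
  (list_.foldl (fun (st : List Int × Int) i =>
      if i == "(" then (st.1 ++ [st.2 + 1], st.2 + 1)
      else if i == ")" then (st.1 ++ [st.2], st.2 - 1)
      else (st.1 ++ [st.2], st.2)) ([], 0)).1

-- ===== PORT B =====
-- loop state: (counts, c); then the pairwise-max comprehension over range(len(list_))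
def get_paren_map_alt (list_ : List String) : List Int :=
  let st := list_.foldl (fun (st : List Int × Int) t =>
      let c := st.2 + (if t == "(" then 1 else if t == ")" then -1 else 0)
      (st.1 ++ [c], c)) ([0], 0)
  (PySem.List.pyRange 0 (list_.length : Int) 1).map
    (fun i => max (PySem.List.pyGetD st.1 i 0) (PySem.List.pyGetD st.1 (i + 1) 0))

-- ===== PRECONDITION & SPEC =====
def Spec_get_paren_map (list_ : List String) (out : List Int) : Prop := out = get_paren_map_alt list_
instance (list_ : List String) (out : List Int) : Decidable (Spec_get_paren_map list_ out) := by unfold Spec_get_paren_map; infer_instance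

-- ===== CLAIM (what is proved, stated in full; the proofs are below) =====
def Claim_equal_get_paren_map : Prop := ∀ (list_ : List String), Dom_get_paren_map list_ → Spec_get_paren_map list_ (get_paren_map list_)

-- ===== LEMMAS AND PROOFS =====

/-- common specification: the depth recorded at each token, given starting count `c` -/
def gpmSpec (c : Int) : List String → List Int
  | [] => []
  | t :: ts =>
      let c' := c + (if t == "(" then 1 else if t == ")" then -1 else 0)
      max c c' :: gpmSpec c' ts

/-- boundary counts c, c+δ₁, c+δ₁+δ₂, … -/
def gpmPrefixes (c : Int) : List String → List Int
  | [] => [c]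
  | t :: ts => c :: gpmPrefixes (c + (if t == "(" then 1 else if t == ")" then -1 else 0)) ts

theorem gpmA_run (l : List String) : ∀ (acc : List Int) (c : Int),
    (l.foldl (fun (st : List Int × Int) i =>
      if i == "(" then (st.1 ++ [st.2 + 1], st.2 + 1)
      else if i == ")" then (st.1 ++ [st.2], st.2 - 1)
      else (st.1 ++ [st.2], st.2)) (acc, c)).1 = acc ++ gpmSpec c l := by
  induction l with
  | nil => intro acc c; simp [gpmSpec]
  | cons t ts ih =>
      intro acc c
      by_cases h1 : t = "("
      · subst h1
        simp only [List.foldl_cons, gpmSpec, ih]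
        norm_num
      · by_cases h2 : t = ")"
        · subst h2
          simp only [List.foldl_cons, gpmSpec, ih]
          norm_num [h1]
          congr 1
        · simp only [List.foldl_cons, gpmSpec, ih]
          simp [h1, h2]

theorem gpmB_run (l : List String) : ∀ (acc : List Int) (c : Int),
    (l.foldl (fun (st : List Int × Int) t =>
      let c := st.2 + (if t == "(" then 1 else if t == ")" then -1 else 0)
      (st.1 ++ [c], c)) (acc ++ [c], c)).1 = acc ++ gpmPrefixes c l := by
  induction l with
  | nil => intro acc c; simp [gpmPrefixes]
  | cons t ts ih =>
      intro acc c
      simp only [List.foldl_cons, gpmPrefixes]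
      have := ih (acc ++ [c]) (c + (if t == "(" then 1 else if t == ")" then -1 else 0))
      simpa using this

theorem gpm_map_eq (l : List String) : ∀ (c : Int),
    (List.range l.length).map
      (fun k => max ((gpmPrefixes c l).getD k 0) ((gpmPrefixes c l).getD (k + 1) 0))
      = gpmSpec c l := by
  induction l with
  | nil => intro c; simp [gpmSpec]
  | cons t ts ih =>
      intro c
      rw [List.length_cons, List.range_succ_eq_map]
      simp only [List.map_cons, List.map_map, gpmSpec]
      refine List.cons_eq_cons.mpr ⟨?_, ?_⟩
      · cases ts <;> simp [gpmPrefixes]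
      · rw [← ih (c + (if t == "(" then 1 else if t == ")" then -1 else 0))]
        apply List.map_congr_left
        intro k _
        simp [gpmPrefixes, Function.comp]

-- ===== VERDICT (by name: the statement is the Claim_ definition above) =====
theorem get_paren_map_spec : Claim_equal_get_paren_map := by
  intro l _
  show get_paren_map l = get_paren_map_alt l
  unfold get_paren_map get_paren_map_alt
  rw [gpmA_run l [] 0]
  have hB := gpmB_run l [] 0
  simp only [List.nil_append] at hB ⊢
  rw [hB]
  rw [PySem.List.pyRange_one 0 (l.length : Int)]
  simp only [List.map_map, sub_zero, Int.toNat_natCast]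
  rw [← gpm_map_eq l 0]
  apply List.map_congr_left
  intro k hk
  simp only [Function.comp, zero_add]
  have h2 : ((k : Int) + 1) = ((k + 1 : Nat) : Int) := by push_cast; ring
  rw [h2, PySem.List.pyGetD_natCast, PySem.List.pyGetD_natCast]
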